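-- pv_equiv track=rewrite | github.com/whj1an/2024Fall | A_ITI 1120A/Assignment 5/A5_300374547 (2)/a5_300374547py.py | people_with_most_friends
-- ===== SOURCE A (Python) =====
-- def people_with_most_friends(network):
--     '''(2Dlist)->1D list
--     Given a 2D-list for friendship network, returns a list of people (IDs) who have the most friends in network.'''
--     max_friends=[]
--     # YOUR CODE GOES HERE
--     count_max_friends = 0
--     for user,friends in network:
--         if len(friends) > count_max_friends:
--             count_max_friends = len(friends)
--     for user, friends in network:
--         if len(friends) == count_max_friends:
--             max_friends.append(user)
--
--
--     return max_friends
-- ===== SOURCE B (Python) =====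
-- def people_with_most_friends(network):
--     count_max_friends = 0
--     max_friends = []
--     for user, friends in network:
--         if len(friends) > count_max_friends:
--             count_max_friends = len(friends)
--             max_friends = [user]
--         elif len(friends) == count_max_friends:
--             max_friends.append(user)
--     return max_friends
-- ===== Notes on version B (the rewrite author's own statement) =====
-- stated objective: alternative
-- what changed: Replaces A's two passes over the network (one to find the maximum friend count, one to collect matching users) with a single pass that maintains the running maximum and the result list together, resetting the list when a new maximum appears.
import Mathlib
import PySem

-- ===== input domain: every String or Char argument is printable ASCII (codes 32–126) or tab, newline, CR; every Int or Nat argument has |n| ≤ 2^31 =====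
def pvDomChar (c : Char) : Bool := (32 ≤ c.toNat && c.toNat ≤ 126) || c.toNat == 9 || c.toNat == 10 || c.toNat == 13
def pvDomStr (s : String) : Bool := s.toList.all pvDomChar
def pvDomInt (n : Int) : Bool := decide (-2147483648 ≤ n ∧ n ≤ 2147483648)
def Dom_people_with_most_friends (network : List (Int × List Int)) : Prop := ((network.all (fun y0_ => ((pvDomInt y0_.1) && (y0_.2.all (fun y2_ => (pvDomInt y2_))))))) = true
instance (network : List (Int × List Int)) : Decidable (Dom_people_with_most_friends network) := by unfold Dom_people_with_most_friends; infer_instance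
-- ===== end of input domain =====

-- B merges A's two passes into one, maintaining the running maximum and result list together.

-- ===== PORT A =====
-- first loop: find the maximum friend count; second loop: collect users with that count
def people_with_most_friends (network : List (Int × List Int)) : List Int :=
  let count_max_friends : Nat :=
    network.foldl (fun c uf => if uf.2.length > c then uf.2.length else c) 0
  network.foldl (fun acc uf => if uf.2.length == count_max_friends then acc ++ [uf.1] else acc) []

-- ===== PORT B =====
-- single pass carrying (count_max_friends, max_friends)
def pwmfAltLoop : List (Int × List Int) → Nat × List Int → Nat × List Int
  | [], st => st
  | (u, fr) :: rest, (c, acc) =>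
      if fr.length > c then pwmfAltLoop rest (fr.length, [u])
      else if fr.length == c then pwmfAltLoop rest (c, acc ++ [u])
      else pwmfAltLoop rest (c, acc)

def people_with_most_friends_alt (network : List (Int × List Int)) : List Int :=
  (pwmfAltLoop network (0, [])).2

-- ===== PRECONDITION & SPEC =====
def Spec_people_with_most_friends (network : List (Int × List Int)) (out : List Int) : Prop := out = people_with_most_friends_alt network
instance (network : List (Int × List Int)) (out : List Int) : Decidable (Spec_people_with_most_friends network out) := by unfold Spec_people_with_most_friends; infer_instance

-- ===== CLAIM (what is proved, stated in full; the proofs are below) =====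
def Claim_equal_people_with_most_friends : Prop := ∀ (network : List (Int × List Int)), Dom_people_with_most_friends network → Spec_people_with_most_friends network (people_with_most_friends network)

-- ===== LEMMAS AND PROOFS =====

-- the running maximum that A's first fold computes
def pwmfMax (network : List (Int × List Int)) (c : Nat) : Nat :=
  network.foldl (fun c uf => if uf.2.length > c then uf.2.length else c) c

-- the users A's second fold collects (in order)
def pwmfCollect (network : List (Int × List Int)) (m : Nat) : List Int :=
  match network with
  | [] => []
  | (u, fr) :: rest => if fr.length == m then u :: pwmfCollect rest m else pwmfCollect rest m

lemma pwmfMax_le (network : List (Int × List Int)) (c : Nat) : c ≤ pwmfMax network c := by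
  induction network generalizing c with
  | nil => simp [pwmfMax]
  | cons hd tl ih =>
      simp only [pwmfMax, List.foldl_cons]
      split_ifs with h
      · exact le_trans (le_of_lt h) (ih _)
      · exact ih c

lemma pwmfCollect_foldl (network : List (Int × List Int)) (m : Nat) (acc : List Int) :
    network.foldl (fun acc uf => if uf.2.length == m then acc ++ [uf.1] else acc) acc
      = acc ++ pwmfCollect network m := by
  induction network generalizing acc with
  | nil => simp [pwmfCollect]
  | cons hd tl ih =>
      obtain ⟨u, fr⟩ := hd
      simp only [List.foldl_cons, pwmfCollect]
      by_cases h : (fr.length == m) = true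
      · rw [if_pos h, if_pos h, ih]; simp
      · rw [if_neg h, if_neg h, ih]

lemma pwmfAltLoop_eq (network : List (Int × List Int)) (c : Nat) (acc : List Int) :
    pwmfAltLoop network (c, acc)
      = (pwmfMax network c,
         (if pwmfMax network c = c then acc else []) ++ pwmfCollect network (pwmfMax network c)) := by
  induction network generalizing c acc with
  | nil => simp [pwmfAltLoop, pwmfMax, pwmfCollect]
  | cons hd tl ih =>
      obtain ⟨u, fr⟩ := hd
      by_cases h1 : fr.length > c
      · simp only [pwmfAltLoop, if_pos h1]
        rw [ih]
        have hle := pwmfMax_le tl fr.length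
        have hm' : pwmfMax ((u, fr) :: tl) c = pwmfMax tl fr.length := by
          simp [pwmfMax, h1]
        rw [hm']
        rw [if_neg (show pwmfMax tl fr.length ≠ c by omega)]
        simp only [pwmfCollect]
        by_cases h2 : fr.length = pwmfMax tl fr.length
        · rw [if_pos h2.symm, if_pos (beq_iff_eq.mpr h2)]
          simp
        · rw [if_neg (fun hh => h2 hh.symm),
              if_neg (fun hh => h2 (beq_iff_eq.mp hh))]
      · have hle := pwmfMax_le tl c
        have hm' : pwmfMax ((u, fr) :: tl) c = pwmfMax tl c := by
          simp [pwmfMax, h1]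
        by_cases h2 : fr.length = c
        · simp only [pwmfAltLoop, if_neg h1,
            if_pos (beq_iff_eq.mpr h2)]
          rw [ih, hm']
          simp only [pwmfCollect]
          by_cases h3 : pwmfMax tl c = c
          · rw [if_pos h3, if_pos h3,
                if_pos (beq_iff_eq.mpr (h2.trans h3.symm))]
            simp
          · rw [if_neg h3, if_neg h3,
                if_neg (show ¬ (fr.length == pwmfMax tl c) = true by
                  simp only [beq_iff_eq]; omega)]
        · simp only [pwmfAltLoop, if_neg h1,
            if_neg (fun hh => h2 (beq_iff_eq.mp hh))]
          rw [ih, hm']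
          simp only [pwmfCollect]
          rw [if_neg (show ¬ (fr.length == pwmfMax tl c) = true by
                simp only [beq_iff_eq]; omega)]

-- ===== VERDICT (by name: the statement is the Claim_ definition above) =====
theorem people_with_most_friends_spec : Claim_equal_people_with_most_friends := by
  intro network _
  unfold Spec_people_with_most_friends people_with_most_friends people_with_most_friends_alt
  rw [pwmfAltLoop_eq]
  rw [pwmfCollect_foldl]
  by_cases h : pwmfMax network 0 = 0 <;> simp [pwmfMax]
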